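-- pv_equiv track=rewrite | github.com/sanaaloute/RealTimeStock | app/scrapers/richbourse_trends.py | _symbol_from_synthese_href
-- ===== SOURCE A (Python) =====
-- def _symbol_from_synthese_href(href: str) -> str | None:
--     """Extract symbol from .../synthese/SYMBOL or .../synthese/SYMBOL."""
--     if not href or "/synthese/" not in href:
--         return None
--     parts = href.rstrip("/").split("/")
--     for i, p in enumerate(parts):
--         if p == "synthese" and i + 1 < len(parts):
--             return (parts[i + 1] or "").strip().upper()
--     return None
-- ===== SOURCE B (Python) =====
-- def _symbol_from_synthese_href(href: str) -> str | None:
--     """Extract symbol from .../synthese/SYMBOL or .../synthese/SYMBOL/."""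
--     if not href or "/synthese/" not in href:
--         return None
--     s = "/" + href.rstrip("/")
--     idx = s.find("/synthese/")
--     if idx == -1:
--         return None
--     tail = s[idx + 10:]
--     return tail.split("/", 1)[0].strip().upper()
-- ===== Notes on version B (the rewrite author's own statement) =====
-- stated objective: simpler
-- what changed: A splits the whole rstripped path on slashes and scans the segment list with enumerate for a marker segment followed by another segment; B never builds a segment list: it prepends a slash to the rstripped href, locates the first slash-delimited marker occurrence with str.find, and takes the first slash-delimited piece of the remainder.
import Mathlib
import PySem

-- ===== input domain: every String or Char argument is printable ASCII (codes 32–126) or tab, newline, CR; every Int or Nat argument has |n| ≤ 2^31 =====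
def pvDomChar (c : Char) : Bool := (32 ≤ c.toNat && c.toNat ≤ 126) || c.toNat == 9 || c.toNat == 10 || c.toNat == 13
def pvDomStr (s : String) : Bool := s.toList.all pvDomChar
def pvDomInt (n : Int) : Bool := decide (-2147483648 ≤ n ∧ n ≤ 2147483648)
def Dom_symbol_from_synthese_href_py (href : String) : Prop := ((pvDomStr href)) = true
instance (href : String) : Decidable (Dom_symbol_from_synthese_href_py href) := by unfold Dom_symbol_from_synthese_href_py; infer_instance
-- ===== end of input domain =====

-- B rewrites A's split-the-whole-path-and-scan-segments loop as a direct str.find search for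
-- the first slash-delimited marker in the slash-prefixed rstripped href (objective: simpler, same cost).

-- ===== PORT A =====
-- shared hand port of Python's str.rstrip("/") (drop trailing '/' characters); exact for every input
def pyRstripSlash (l : List Char) : List Char := (l.reverse.dropWhile (· == '/')).reverse

def aLoop (parts : List (List Char)) : List (Int × List Char) → Option String
  | [] => none
  | (i, p) :: rest =>
      if p = "synthese".toList ∧ i + 1 < (parts.length : Int)
      then some (String.ofList (PySem.Chars.upper (PySem.Chars.strip (PySem.List.pyGetD parts (i+1) []))))
      else aLoop parts rest

def symbol_from_synthese_href_py (href : String) : Option String :=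
  if href == "" || !(PySem.Str.isIn "/synthese/" href) then none
  else
    let parts := PySem.Chars.splitOn (pyRstripSlash href.toList) "/".toList
    aLoop parts (PySem.List.enumerate parts 0)


-- ===== PORT B =====
def symbol_from_synthese_href_py_alt (href : String) : Option String :=
  if href == "" || !(PySem.Str.isIn "/synthese/" href) then none
  else
    let s := '/' :: pyRstripSlash href.toList
    let idx := PySem.Chars.find s "/synthese/".toList
    if idx == -1 then none
    else
      let tail := PySem.List.slice s (some (idx + 10)) none
      some (String.ofList (PySem.Chars.upper (PySem.Chars.strip ((PySem.Chars.splitOnMax tail "/".toList 1).headD []))))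


-- ===== PRECONDITION & SPEC =====
def Spec_symbol_from_synthese_href_py (href : String) (out : Option String) : Prop := out = symbol_from_synthese_href_py_alt href
instance (href : String) (out : Option String) : Decidable (Spec_symbol_from_synthese_href_py href out) := by unfold Spec_symbol_from_synthese_href_py; infer_instance

-- ===== CLAIM (what is proved, stated in full; the proofs are below) =====
def Claim_equal_symbol_from_synthese_href_py : Prop := ∀ (href : String), Dom_symbol_from_synthese_href_py href → Spec_symbol_from_synthese_href_py href (symbol_from_synthese_href_py href)

-- ===== LEMMAS AND PROOFS =====
def spSeg : List Char → List (List Char)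
  | [] => [[]]
  | c :: r => if c = '/' then [] :: spSeg r else
      match spSeg r with
      | [] => [[c]]
      | h :: t => (c :: h) :: t

def segScan : List (List Char) → Option (List Char)
  | [] => none
  | p :: rest => if p = "synthese".toList ∧ rest ≠ [] then some (rest.headD []) else segScan rest

def findSyn : List Char → Option Nat
  | [] => none
  | c :: r => if "/synthese/".toList.isPrefixOf (c :: r) then some 0 else (findSyn r).map (· + 1)

lemma spSeg_ne_nil (l : List Char) : spSeg l ≠ [] := by
  induction l with
  | nil => simp [spSeg]
  | cons c r ih =>
    simp only [spSeg]
    split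
    · simp
    · cases h : spSeg r <;> simp

lemma splitOn_go_eq (l : List Char) : ∀ (fuel : Nat) (cur : List Char) (acc : List (List Char)),
    l.length ≤ fuel →
    PySem.Chars.splitOn.go ['/'] fuel l cur acc
      = acc.reverse ++ (cur.reverse ++ (spSeg l).headD []) :: (spSeg l).tail := by
  induction l with
  | nil =>
    intro fuel cur acc _
    cases fuel <;> simp [PySem.Chars.splitOn.go, spSeg]
  | cons c r ih =>
    intro fuel cur acc hf
    cases fuel with
    | zero => simp at hf
    | succ f =>
      simp only [PySem.Chars.splitOn.go]
      by_cases hc : c = '/'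
      · subst hc
        have hpref : ([ '/' ] : List Char).isPrefixOf ('/' :: r) = true := by simp [List.isPrefixOf]
        rw [if_pos hpref]
        simp only [List.length_cons] at hf
        simp only [List.length_cons, List.length_nil, List.drop_succ_cons, List.drop_zero]
        rw [ih f [] (cur.reverse :: acc) (by omega)]
        simp only [spSeg]
        rcases h : spSeg r with _ | ⟨hd, tl⟩
        · exact absurd h (spSeg_ne_nil r)
        · simp
      · have hpref : ([ '/' ] : List Char).isPrefixOf (c :: r) = false := by
          simp [List.isPrefixOf]
          exact fun h => absurd h.symm hc
        rw [if_neg (by simp [hpref])]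
        simp only [List.length_cons] at hf
        rw [ih f (c :: cur) acc (by omega)]
        simp only [spSeg, if_neg hc]
        rcases h : spSeg r with _ | ⟨hd, tl⟩
        · exact absurd h (spSeg_ne_nil r)
        · simp

lemma splitOn_eq_spSeg (l : List Char) : PySem.Chars.splitOn l "/".toList = spSeg l := by
  have : ("/".toList : List Char) = ['/'] := by decide
  rw [this]
  show PySem.Chars.splitOn.go ['/'] (l.length + 1) l [] [] = spSeg l
  rw [splitOn_go_eq l (l.length + 1) [] [] (by omega)]
  rcases h : spSeg l with _ | ⟨hd, tl⟩
  · exact absurd h (spSeg_ne_nil l)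
  · simp

lemma spSeg_headD (l : List Char) : (spSeg l).headD [] = l.takeWhile (· != '/') := by
  induction l with
  | nil => simp [spSeg]
  | cons c r ih =>
    simp only [spSeg]
    by_cases hc : c = '/'
    · subst hc; simp
    · rw [if_neg hc]
      rcases h : spSeg r with _ | ⟨hd, tl⟩
      · exact absurd h (spSeg_ne_nil r)
      · simp only [List.headD_cons]
        rw [List.takeWhile_cons_of_pos (by simp [hc])]
        rw [h] at ih
        simp only [List.headD_cons] at ih
        rw [ih]

lemma splitOnMax1_go_head (l : List Char) : ∀ (fuel : Nat) (cur : List Char) (acc : List (List Char)),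
    l.length ≤ fuel →
    ∃ r, PySem.Chars.splitOnMax.go ['/'] fuel 1 l cur acc
      = acc.reverse ++ (cur.reverse ++ l.takeWhile (· != '/')) :: r := by
  induction l with
  | nil =>
    intro fuel cur acc _
    cases fuel <;> exact ⟨[], by simp [PySem.Chars.splitOnMax.go]⟩
  | cons c r ih =>
    intro fuel cur acc hf
    cases fuel with
    | zero => simp at hf
    | succ f =>
      simp only [PySem.Chars.splitOnMax.go]
      rw [if_neg (by omega)]
      by_cases hc : c = '/'
      · subst hc
        have hpref : ([ '/' ] : List Char).isPrefixOf ('/' :: r) = true := by simp [List.isPrefixOf]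
        rw [if_pos hpref]
        refine ⟨[r], ?_⟩
        simp only [List.length_cons, List.length_nil, List.drop_succ_cons, List.drop_zero]
        cases f with
        | zero =>
          simp only [List.length_cons] at hf
          have hr0 : r = [] := by
            cases r with
            | nil => rfl
            | cons a b => simp at hf
          subst hr0
          simp [PySem.Chars.splitOnMax.go]
        | succ f' =>
          cases r with
          | nil => simp [PySem.Chars.splitOnMax.go]
          | cons d r' =>
            show PySem.Chars.splitOnMax.go ['/'] (f'+1) 0 (d :: r') [] (cur.reverse :: acc) = _
            simp [PySem.Chars.splitOnMax.go]
      · have hpref : ([ '/' ] : List Char).isPrefixOf (c :: r) = false := by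
          simp [List.isPrefixOf]
          exact fun h => absurd h.symm hc
        rw [if_neg (by simp [hpref])]
        simp only [List.length_cons] at hf
        obtain ⟨rr, hrr⟩ := ih f (c :: cur) acc (by omega)
        refine ⟨rr, ?_⟩
        rw [hrr]
        rw [List.takeWhile_cons_of_pos (by simp [hc])]
        simp

lemma splitOnMax1_headD (l : List Char) :
    (PySem.Chars.splitOnMax l "/".toList 1).headD [] = l.takeWhile (· != '/') := by
  have h1 : ("/".toList : List Char) = ['/'] := by decide
  unfold PySem.Chars.splitOnMax
  rw [if_neg (by omega), h1]
  obtain ⟨r, hr⟩ := splitOnMax1_go_head l (l.length + 1) [] [] (by omega)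
  show (PySem.Chars.splitOnMax.go ['/'] (l.length + 1) (1 : Int).toNat l [] []).headD [] = _
  rw [show ((1:Int).toNat) = 1 from rfl, hr]
  simp

lemma find_go_eq (l : List Char) : ∀ (k : Nat),
    PySem.Chars.find.go "/synthese/".toList l k
      = match findSyn l with
        | some n => ((k + n : Nat) : Int)
        | none => -1 := by
  induction l with
  | nil => intro k; rfl
  | cons c r ih =>
    intro k
    simp only [PySem.Chars.find.go, findSyn]
    by_cases hp : "/synthese/".toList.isPrefixOf (c :: r)
    · rw [if_pos hp, if_pos hp]
      simp
    · rw [if_neg hp, if_neg hp, ih (k + 1)]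
      cases hfs : findSyn r with
      | none => rfl
      | some n => simp only [Option.map_some]; push_cast; ring

lemma find_eq_findSyn (l : List Char) :
    PySem.Chars.find l "/synthese/".toList
      = match findSyn l with
        | some n => (n : Int)
        | none => -1 := by
  show PySem.Chars.find.go "/synthese/".toList l 0 = _
  rw [find_go_eq l 0]
  rcases h : findSyn l with _ | n <;> simp

lemma findSyn_eq_none_iff (l : List Char) :
    findSyn l = none ↔ ¬ ("/synthese/".toList <:+: l) := by
  induction l with
  | nil =>
    rw [show findSyn [] = none from rfl]
    simp
  | cons c r ih =>
    simp only [findSyn]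
    by_cases hp : "/synthese/".toList.isPrefixOf (c :: r)
    · rw [if_pos hp]
      exact iff_of_false (by simp) (not_not_intro (List.IsPrefix.isInfix (List.isPrefixOf_iff_prefix.mp hp)))
    · rw [if_neg hp]
      simp only [Option.map_eq_none_iff, ih, List.infix_cons_iff]
      constructor
      · rintro h (h1 | h2)
        · exact hp (List.isPrefixOf_iff_prefix.mpr h1)
        · exact h h2
      · intro h h2
        exact h (Or.inr h2)

lemma spSeg_no_slash (l : List Char) (h : '/' ∉ l) : spSeg l = [l] := by
  induction l with
  | nil => rfl
  | cons c r ih =>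
    simp only [spSeg]
    rw [if_neg (by simp at h; exact fun hc => h.1 hc.symm)]
    rw [ih (by simp at h; exact h.2)]

lemma spSeg_append_slash (seg t' : List Char) (h : '/' ∉ seg) :
    spSeg (seg ++ '/' :: t') = seg :: spSeg t' := by
  induction seg with
  | nil => simp [spSeg]
  | cons c s ih =>
    simp only [List.cons_append, spSeg]
    rw [if_neg (by simp at h; exact fun hc => h.1 hc.symm)]
    rw [ih (by simp at h; exact h.2)]

lemma prefix_slash_eq (a b c : List Char) (ha : '/' ∉ a) (hb : '/' ∉ b)
    (h : (a ++ ['/']) <+: (b ++ '/' :: c)) : a = b := by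
  induction a generalizing b with
  | nil =>
    cases b with
    | nil => rfl
    | cons x b' =>
      simp only [List.nil_append, List.cons_append] at h
      obtain ⟨t, ht⟩ := h
      simp at ht
      exact absurd (by simp [← ht.1]) hb
  | cons x a' ih' =>
    cases b with
    | nil =>
      simp only [List.cons_append, List.nil_append] at h
      obtain ⟨t, ht⟩ := h
      simp at ht
      exact absurd (by simp [ht.1]) ha
    | cons y b' =>
      simp only [List.cons_append] at h
      obtain ⟨t, ht⟩ := h
      simp only [List.cons_append, List.cons.injEq] at ht
      have hx : x = y := ht.1
      have : a' = b' :=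
        ih' b' (by simp at ha; exact ha.2) (by simp at hb; exact hb.2) ⟨t, by simpa using ht.2⟩
      rw [hx, this]

-- "synthese/" prefix of seg ++ '/'::t' with '/' ∉ seg iff seg = "synthese"
lemma syn_prefix_iff (seg t' : List Char) (h : '/' ∉ seg) :
    ("synthese/".toList <+: (seg ++ '/' :: t')) ↔ seg = "synthese".toList := by
  constructor
  · intro hp
    have : ("synthese".toList ++ ['/']) <+: (seg ++ '/' :: t') := by
      simpa using hp
    exact (prefix_slash_eq "synthese".toList seg t' (by decide) h this).symm
  · rintro rfl
    exact ⟨t', rfl⟩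

lemma findSyn_cons_ne (c : Char) (hc : c ≠ '/') (r : List Char) :
    findSyn (c :: r) = (findSyn r).map (· + 1) := by
  simp only [findSyn]
  rw [if_neg]
  intro hp
  have := List.isPrefixOf_iff_prefix.mp hp
  obtain ⟨t, ht⟩ := this
  simp at ht
  exact hc ht.1.symm

lemma findSyn_append_seg (seg : List Char) (h : '/' ∉ seg) (l : List Char) :
    findSyn (seg ++ l) = (findSyn l).map (· + seg.length) := by
  induction seg with
  | nil =>
    simp only [List.nil_append, List.length_nil]
    cases findSyn l <;> simp
  | cons c s ih =>
    rw [List.cons_append, findSyn_cons_ne c (by simp at h; exact fun hc => h.1 hc.symm) _]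
    rw [ih (by simp at h; exact h.2)]
    cases findSyn l <;> simp
    omega

lemma findSyn_cons_of_not_prefix (c : Char) (r : List Char)
    (h : "/synthese/".toList.isPrefixOf (c :: r) = false) :
    findSyn (c :: r) = (findSyn r).map (· + 1) := by
  conv_lhs => rw [findSyn]
  rw [if_neg (by rw [h]; simp)]

def bcoreOpt (t : List Char) : Option (List Char) :=
  (findSyn ('/' :: t)).map (fun n => (('/' :: t).drop (n + 10)).takeWhile (· != '/'))

lemma count_slash_zero (t : List Char) (h : '/' ∉ t) : t.count '/' = 0 :=
  List.count_eq_zero.mpr h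

lemma bridgeL : ∀ (N : Nat) (t : List Char), t.length ≤ N → bcoreOpt t = segScan (spSeg t) := by
  intro N
  induction N with
  | zero =>
    intro t ht
    have : t = [] := by cases t <;> simp_all
    subst this
    decide
  | succ N ih =>
    intro t ht
    by_cases hs : '/' ∈ t
    · -- decompose t = seg ++ '/' :: t'
      have hsplit : t.takeWhile (· != '/') ++ t.dropWhile (· != '/') = t := List.takeWhile_append_dropWhile
      set seg := t.takeWhile (· != '/') with hseg
      have hdnil : t.dropWhile (· != '/') ≠ [] := by
        intro hnil
        rw [hnil, List.append_nil] at hsplit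
        rw [← hsplit] at hs
        have := List.mem_takeWhile_imp hs
        simp at this
      obtain ⟨d, t', hd⟩ := List.exists_cons_of_ne_nil hdnil
      have hdhead : d = '/' := by
        have h0 := List.head_dropWhile_not (fun x => x != '/') hdnil
        simp [hd] at h0
        exact h0
      have hnoslash : '/' ∉ seg := by
        intro hmem
        have := List.mem_takeWhile_imp hmem
        simp at this
      have ht' : t = seg ++ '/' :: t' := by rw [← hdhead, ← hd, hseg, hsplit]
      have hlen : t'.length ≤ N := by
        have : t.length = seg.length + 1 + t'.length := by rw [ht']; simp; omega
        omega
      by_cases hsy : seg = "synthese".toList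
      · -- found at position 0
        have hpre : "/synthese/".toList.isPrefixOf ('/' :: t) = true := by
          apply List.isPrefixOf_iff_prefix.mpr
          rw [ht', hsy]
          exact ⟨t', rfl⟩
        have hF : findSyn ('/' :: t) = some 0 := by
          simp only [findSyn]
          rw [if_pos hpre]
        have hdrop : ('/' :: t).drop 10 = t' := by
          rw [ht', hsy]
          show ("/synthese/".toList ++ t').drop ("/synthese/".toList.length) = t'
          exact List.drop_left
        unfold bcoreOpt
        rw [hF]
        simp only [Option.map_some, Nat.zero_add]
        rw [hdrop]
        rw [ht', hsy, spSeg_append_slash _ _ (by decide)]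
        simp only [segScan]
        rw [if_pos (by simp [spSeg_ne_nil t'])]
        rcases hsp : spSeg t' with _ | ⟨hd', tl'⟩
        · exact absurd hsp (spSeg_ne_nil t')
        · have := spSeg_headD t'
          rw [hsp] at this
          simp only [List.headD_cons] at this
          simp [this]
      · -- skip this segment
        have hnpre : "/synthese/".toList.isPrefixOf ('/' :: t) = false := by
          rw [Bool.eq_false_iff]
          intro hp
          have hp' := List.isPrefixOf_iff_prefix.mp hp
          have : "synthese/".toList <+: t := by
            obtain ⟨u, hu⟩ := hp'
            exact ⟨u, by simpa using hu⟩
          rw [ht'] at this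
          exact hsy ((syn_prefix_iff seg t' hnoslash).mp this)
        have hF : findSyn ('/' :: t) = (findSyn ('/' :: t')).map (· + (seg.length + 1)) := by
          rw [findSyn_cons_of_not_prefix _ _ hnpre]
          conv_lhs => rw [ht']
          rw [findSyn_append_seg seg hnoslash ('/' :: t')]
          cases hft : findSyn ('/' :: t') <;> simp
          omega
        unfold bcoreOpt
        rw [hF]
        rw [ht', spSeg_append_slash _ _ hnoslash]
        simp only [segScan]
        rw [if_neg (by rintro ⟨h1, _⟩; exact hsy h1)]
        rw [← ih t' hlen]
        unfold bcoreOpt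
        cases hft : findSyn ('/' :: t') with
        | none => simp
        | some n =>
          simp only [Option.map_some]
          congr 1
          have harr : n + (seg.length + 1) + 10 = (seg.length + 1) + (n + 10) := by omega
          rw [harr]
          have : ('/' :: (seg ++ '/' :: t')) = ('/' :: seg) ++ ('/' :: t') := by simp
          rw [this, List.drop_append]
          have e1 : List.drop (seg.length + 1 + (n + 10)) ('/' :: seg) = [] :=
            List.drop_eq_nil_of_le (by simp)
          have e2 : seg.length + 1 + (n + 10) - ('/' :: seg).length = n + 10 := by simp
          rw [e1, e2, List.nil_append]
    · -- no slash in t at all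
      have hsp : spSeg t = [t] := spSeg_no_slash t hs
      rw [hsp]
      have hnone : findSyn ('/' :: t) = none := by
        rw [findSyn_eq_none_iff]
        intro hinf
        have hcount := hinf.sublist.count_le '/'
        have h1 : ("/synthese/".toList).count '/' = 2 := by decide
        have h2 : ('/' :: t).count '/' = 1 := by
          simp [count_slash_zero t hs]
        omega
      unfold bcoreOpt
      rw [hnone]
      simp [segScan]

lemma aLoop_eq (suf : List (List Char)) : ∀ (pre : List (List Char)),
    aLoop (pre ++ suf) (PySem.List.enumerate suf (pre.length : Int))
      = (segScan suf).map (fun seg => String.ofList (PySem.Chars.upper (PySem.Chars.strip seg))) := by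
  induction suf with
  | nil => intro pre; simp [PySem.List.enumerate, aLoop, segScan]
  | cons p rest ih =>
    intro pre
    rw [PySem.List.enumerate_cons]
    simp only [aLoop, segScan]
    by_cases hcond : p = "synthese".toList ∧ rest ≠ []
    · obtain ⟨hp, hrest⟩ := hcond
      obtain ⟨h, t', rfl⟩ := List.exists_cons_of_ne_nil hrest
      rw [if_pos ⟨hp, by simp only [List.length_append, List.length_cons]; push_cast; omega⟩]
      rw [if_pos ⟨hp, by simp⟩]
      have hidx : ((pre.length : Int) + 1) = ((pre.length + 1 : Nat) : Int) := by push_cast; ring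
      rw [hidx, PySem.List.pyGetD_natCast]
      have : (pre ++ p :: h :: t').getD (pre.length + 1) [] = h := by
        rw [List.getD_eq_getElem?_getD]
        rw [show pre ++ p :: h :: t' = (pre ++ [p]) ++ h :: t' by simp]
        rw [List.getElem?_append_right (by simp)]
        simp
      rw [this]
      simp
    · rw [if_neg (by
        intro ⟨h1, h2⟩
        apply hcond
        refine ⟨h1, ?_⟩
        intro hnil
        subst hnil
        simp only [List.length_append, List.length_cons, List.length_nil] at h2
        push_cast at h2
        omega)]
      rw [if_neg hcond]
      have hpre' : ((pre.length : Int) + 1) = (((pre ++ [p]).length : Nat) : Int) := by simp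
      rw [hpre']
      have hlist : pre ++ p :: rest = (pre ++ [p]) ++ rest := by simp
      rw [hlist]
      exact ih (pre ++ [p])

theorem ports_agree (href : String) :
    symbol_from_synthese_href_py href = symbol_from_synthese_href_py_alt href := by
  unfold symbol_from_synthese_href_py symbol_from_synthese_href_py_alt
  by_cases hg : (href == "" || !(PySem.Str.isIn "/synthese/" href)) = true
  · rw [if_pos hg, if_pos hg]
  · rw [if_neg hg, if_neg hg]
    simp only []
    rw [splitOn_eq_spSeg]
    have hA : aLoop (spSeg (pyRstripSlash href.toList))
        (PySem.List.enumerate (spSeg (pyRstripSlash href.toList)) 0)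
        = (segScan (spSeg (pyRstripSlash href.toList))).map
            (fun seg => String.ofList (PySem.Chars.upper (PySem.Chars.strip seg))) := by
      have h0 := aLoop_eq (spSeg (pyRstripSlash href.toList)) []
      simpa using h0
    rw [hA, ← bridgeL (pyRstripSlash href.toList).length _ (le_refl _)]
    unfold bcoreOpt
    rw [find_eq_findSyn]
    cases hfs : findSyn ('/' :: pyRstripSlash href.toList) with
    | none => simp
    | some n =>
      simp only [Option.map_some]
      rw [if_neg (by simp)]
      rw [PySem.List.slice_from _ (by positivity)]
      have htn : ((n : Int) + 10).toNat = n + 10 := by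
        rw [show ((n : Int) + 10) = ((n + 10 : Nat) : Int) by push_cast; ring, Int.toNat_natCast]
      rw [htn, splitOnMax1_headD]

-- ===== VERDICT (by name: the statement is the Claim_ definition above) =====
theorem symbol_from_synthese_href_py_spec : Claim_equal_symbol_from_synthese_href_py := by
  intro href _
  unfold Spec_symbol_from_synthese_href_py
  exact ports_agree href
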